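-- pv_equiv track=rewrite | github.com/starius/config | .bin/plowbackup.py | unescape_file
-- ===== SOURCE A (Python) =====
-- PARTS_DIR = '$parts_dir/'
--
-- def unescape_file(arg):
--     if arg in ('$f1', '$f2', '$f'):
--         return arg
--     if arg.startswith(PARTS_DIR):
--         prefix_length = len(PARTS_DIR)
--         other = arg[prefix_length:]
--         return PARTS_DIR + unescape_file(other)
--     if arg.startswith("'") and arg.endswith("'"):
--         arg = arg[1:-1] # remove ' '
--     arg = arg.replace(r"'\''", "'")
--     if arg.startswith('./-'):
--         arg = arg[2:] # remove ./
--     return arg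
-- ===== SOURCE B (Python) =====
-- PARTS_DIR = '$parts_dir/'
--
-- def unescape_file(arg):
--     # Iterative: count stripped PARTS_DIR prefixes, process the leftover once,
--     # then prepend PARTS_DIR * count.
--     count = 0
--     while arg not in ('$f1', '$f2', '$f') and arg.startswith(PARTS_DIR):
--         arg = arg[len(PARTS_DIR):]
--         count += 1
--     if arg not in ('$f1', '$f2', '$f'):
--         if arg.startswith("'") and arg.endswith("'"):
--             arg = arg[1:-1]
--         arg = arg.replace(r"'\''", "'")
--         if arg.startswith('./-'):
--             arg = arg[2:]
--     return PARTS_DIR * count + arg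
-- ===== Notes on version B (the rewrite author's own statement) =====
-- stated objective: alternative
-- what changed: Replaced A's recursion (which re-prepends PARTS_DIR at every level) with a single iterative loop that counts stripped PARTS_DIR prefixes, processes the leftover once, and returns PARTS_DIR * count + leftover.
import Mathlib
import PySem

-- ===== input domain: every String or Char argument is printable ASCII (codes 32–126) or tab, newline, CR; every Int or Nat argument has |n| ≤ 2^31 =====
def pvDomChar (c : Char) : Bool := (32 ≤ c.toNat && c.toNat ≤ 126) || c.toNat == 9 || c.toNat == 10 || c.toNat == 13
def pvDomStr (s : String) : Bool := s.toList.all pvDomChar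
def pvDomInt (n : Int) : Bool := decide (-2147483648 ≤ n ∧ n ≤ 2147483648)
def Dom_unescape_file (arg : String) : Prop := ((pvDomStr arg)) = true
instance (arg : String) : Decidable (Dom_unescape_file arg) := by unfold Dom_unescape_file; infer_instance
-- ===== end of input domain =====

-- B replaces A's recursion by an iterative strip-count loop plus one final concatenation (alternative decomposition).

-- ===== PORT A =====
def pvPartsDir : List Char := "$parts_dir/".toList

-- needed by the ports' termination proofs (cited in decreasing_by)
theorem pvStrip_lt (arg : List Char) (h : PySem.Chars.startswith arg pvPartsDir = true) :
    (PySem.List.slice arg (some ((pvPartsDir.length : Nat) : Int)) none).length < arg.length := by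
  rw [PySem.List.slice_from_natCast]
  have hp := (PySem.Chars.startswith_iff arg pvPartsDir).mp h
  have hlen : pvPartsDir.length ≤ arg.length := hp.length_le
  have : pvPartsDir.length = 11 := by decide
  simp [List.length_drop]
  omega

-- literal transliteration of A's recursion
def unescapeA (arg : List Char) : List Char :=
  if arg = "$f1".toList ∨ arg = "$f2".toList ∨ arg = "$f".toList then arg
  else if h : PySem.Chars.startswith arg pvPartsDir = true then
    pvPartsDir ++ unescapeA (PySem.List.slice arg (some ((pvPartsDir.length : Nat) : Int)) none)
  else
    let a1 := if PySem.Chars.startswith arg "'".toList && PySem.Chars.endswith arg "'".toList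
              then PySem.List.slice arg (some 1) (some (-1)) else arg
    let a2 := PySem.Chars.replace a1 "'\\''".toList "'".toList
    if PySem.Chars.startswith a2 "./-".toList then PySem.List.slice a2 (some 2) none else a2
termination_by arg.length
decreasing_by exact pvStrip_lt arg h

def unescape_file (arg : String) : String := String.ofList (unescapeA arg.toList)

-- ===== PORT B =====
-- B's while loop: strip PARTS_DIR prefixes, counting them
def stripCount (arg : List Char) (count : Nat) : List Char × Nat :=
  if h : ¬(arg = "$f1".toList ∨ arg = "$f2".toList ∨ arg = "$f".toList) ∧
      PySem.Chars.startswith arg pvPartsDir = true then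
    stripCount (PySem.List.slice arg (some ((pvPartsDir.length : Nat) : Int)) none) (count + 1)
  else (arg, count)
termination_by arg.length
decreasing_by exact pvStrip_lt arg h.2

def unescapeB (arg : List Char) : List Char :=
  let p := stripCount arg 0
  let rest := p.1
  let res :=
    if rest = "$f1".toList ∨ rest = "$f2".toList ∨ rest = "$f".toList then rest
    else
      let a1 := if PySem.Chars.startswith rest "'".toList && PySem.Chars.endswith rest "'".toList
                then PySem.List.slice rest (some 1) (some (-1)) else rest
      let a2 := PySem.Chars.replace a1 "'\\''".toList "'".toList
      if PySem.Chars.startswith a2 "./-".toList then PySem.List.slice a2 (some 2) none else a2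
  (List.replicate p.2 pvPartsDir).flatten ++ res

def unescape_file_alt (arg : String) : String := String.ofList (unescapeB arg.toList)

-- ===== PRECONDITION & SPEC =====
def Spec_unescape_file (arg : String) (out : String) : Prop := out = unescape_file_alt arg
instance (arg : String) (out : String) : Decidable (Spec_unescape_file arg out) := by unfold Spec_unescape_file; infer_instance

-- ===== CLAIM (what is proved, stated in full; the proofs are below) =====
def Claim_equal_unescape_file : Prop := ∀ (arg : String), Dom_unescape_file arg → Spec_unescape_file arg (unescape_file arg)

-- ===== LEMMAS AND PROOFS =====

theorem stripCount_pos (arg : List Char) (c : Nat)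
    (hsent : ¬(arg = "$f1".toList ∨ arg = "$f2".toList ∨ arg = "$f".toList))
    (h : PySem.Chars.startswith arg pvPartsDir = true) :
    stripCount arg c = stripCount (PySem.List.slice arg (some ((pvPartsDir.length : Nat) : Int)) none) (c + 1) := by
  rw [stripCount, dif_pos ⟨hsent, h⟩]

theorem stripCount_neg (arg : List Char) (c : Nat)
    (h : ¬(¬(arg = "$f1".toList ∨ arg = "$f2".toList ∨ arg = "$f".toList) ∧
        PySem.Chars.startswith arg pvPartsDir = true)) :
    stripCount arg c = (arg, c) := by
  rw [stripCount, dif_neg h]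

theorem stripCount_shift (arg : List Char) (c : Nat) :
    stripCount arg (c + 1) = ((stripCount arg c).1, (stripCount arg c).2 + 1) := by
  induction arg, c using stripCount.induct with
  | case1 arg cnt h ih =>
      rw [stripCount_pos arg _ h.1 h.2, stripCount_pos arg _ h.1 h.2, ih]
  | case2 arg cnt h =>
      rw [stripCount_neg arg _ h, stripCount_neg arg _ h]

theorem unescapeA_eq_unescapeB (arg : List Char) : unescapeA arg = unescapeB arg := by
  induction arg using unescapeA.induct with
  | case1 arg hsent =>
      rw [unescapeA, if_pos hsent, unescapeB,
          stripCount_neg arg 0 (fun hc => hc.1 hsent)]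
      simp only [List.replicate, List.flatten_nil, List.nil_append, if_pos hsent]
  | case2 arg hsent h ih =>
      rw [unescapeA, if_neg hsent, dif_pos h, ih, unescapeB, unescapeB,
          stripCount_pos arg 0 hsent h, stripCount_shift]
      simp only [List.replicate_succ, List.flatten_cons, List.append_assoc]
  | case3 arg hsent h _ =>
      rw [unescapeA, if_neg hsent, dif_neg h, unescapeB,
          stripCount_neg arg 0 (fun hc => h hc.2)]
      simp only [List.replicate, List.flatten_nil, List.nil_append, if_neg hsent]
  | case4 arg hsent h _ =>
      rw [unescapeA, if_neg hsent, dif_neg h, unescapeB,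
          stripCount_neg arg 0 (fun hc => h hc.2)]
      simp only [List.replicate, List.flatten_nil, List.nil_append, if_neg hsent]

-- ===== VERDICT (by name: the statement is the Claim_ definition above) =====
theorem unescape_file_spec : Claim_equal_unescape_file := by
  intro arg _
  unfold Spec_unescape_file unescape_file unescape_file_alt
  rw [unescapeA_eq_unescapeB]
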